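-- pv_equiv track=rewrite | github.com/GabrieleFormiconi/hostflow-web | app.py | detect_booking_export
-- ===== SOURCE A (Python) =====
-- def detect_booking_export(columns):
--     cols = [str(c).strip().lower() for c in columns]
--     return (
--         any("nome osp" in c for c in cols)
--         and any("arrivo" in c for c in cols)
--         and any("partenza" in c for c in cols)
--         and any("prezzo" in c for c in cols)
--         and any("persone" in c for c in cols)
--     )
-- ===== SOURCE B (Python) =====
-- def detect_booking_export(columns):
--     text = "\n".join(str(c).strip().lower() for c in columns)
--     return all(k in text for k in ("nome osp", "arrivo", "partenza", "prezzo", "persone"))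
-- ===== Notes on version B (the rewrite author's own statement) =====
-- stated objective: alternative
-- what changed: B joins all normalized columns into one newline-separated haystack and searches each keyword once in that single text (correct because no keyword contains a newline, so a match cannot span the separator), instead of A's per-column any() scans.
import Mathlib
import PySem

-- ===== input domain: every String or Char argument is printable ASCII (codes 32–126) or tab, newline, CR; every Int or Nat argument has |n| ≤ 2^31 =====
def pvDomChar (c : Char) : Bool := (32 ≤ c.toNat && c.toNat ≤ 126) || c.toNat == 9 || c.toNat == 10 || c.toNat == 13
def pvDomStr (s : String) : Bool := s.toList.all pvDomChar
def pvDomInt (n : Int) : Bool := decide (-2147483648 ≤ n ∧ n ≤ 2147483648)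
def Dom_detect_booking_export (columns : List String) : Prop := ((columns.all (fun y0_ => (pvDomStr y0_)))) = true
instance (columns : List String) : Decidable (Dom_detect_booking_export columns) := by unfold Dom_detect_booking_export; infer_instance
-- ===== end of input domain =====

-- B joins the normalized columns into one newline-separated text and searches each keyword once in it (no keyword contains a newline, so no match spans the separator); return values agree everywhere.
-- ===== PORT A =====
def detect_booking_export (columns : List String) : Bool :=
  let cols := columns.map (fun c => PySem.Str.lower (PySem.Str.strip c))
  (cols.any (fun c => PySem.Str.isIn "nome osp" c))
  && (cols.any (fun c => PySem.Str.isIn "arrivo" c))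
  && (cols.any (fun c => PySem.Str.isIn "partenza" c))
  && (cols.any (fun c => PySem.Str.isIn "prezzo" c))
  && (cols.any (fun c => PySem.Str.isIn "persone" c))

-- ===== PORT B =====
def detect_booking_export_alt (columns : List String) : Bool :=
  let text := PySem.Str.join "\n" (columns.map (fun c => PySem.Str.lower (PySem.Str.strip c)))
  (["nome osp", "arrivo", "partenza", "prezzo", "persone"] : List String).all
    (fun k => PySem.Str.isIn k text)

-- ===== PRECONDITION & SPEC =====
def Spec_detect_booking_export (columns : List String) (out : Bool) : Prop := out = detect_booking_export_alt columns
instance (columns : List String) (out : Bool) : Decidable (Spec_detect_booking_export columns out) := by unfold Spec_detect_booking_export; infer_instance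

-- ===== CLAIM (what is proved, stated in full; the proofs are below) =====
def Claim_equal_detect_booking_export : Prop := ∀ (columns : List String), Dom_detect_booking_export columns → Spec_detect_booking_export columns (detect_booking_export columns)

-- ===== LEMMAS AND PROOFS =====

-- An infix not containing c of l1 ++ c :: l2 lies wholly inside l1 or wholly inside l2.
theorem pvInfix_append_cons {α : Type} (w l1 l2 : List α) (c : α) (hc : c ∉ w) :
    w <:+: (l1 ++ c :: l2) ↔ w <:+: l1 ∨ w <:+: l2 := by
  constructor
  · rintro ⟨s, t, h⟩
    rw [List.append_assoc] at h
    by_cases h1 : l1.length < s.length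
    · -- occurrence starts after c: inside l2
      right
      have hR : (l1 ++ c :: l2).drop (l1.length + 1) = l2 := by
        rw [show l1 ++ c :: l2 = (l1 ++ [c]) ++ l2 by simp]
        exact List.drop_left' (by simp)
      have hd : s.drop (l1.length + 1) ++ (w ++ t) = l2 := by
        rw [← hR, ← h, List.drop_append_of_le_length (by omega)]
      exact ⟨s.drop (l1.length + 1), t, by rw [List.append_assoc, hd]⟩
    · by_cases h2 : s.length + w.length ≤ l1.length
      · -- occurrence ends before c: inside l1
        left
        have ht : s ++ (w ++ t.take (l1.length - s.length - w.length)) = l1 := by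
          have h' : (s ++ (w ++ t)).take l1.length = l1 := by rw [h, List.take_left]
          rw [List.take_append, List.take_append] at h'
          rw [List.take_of_length_le (by omega), List.take_of_length_le (by omega)] at h'
          simpa using h'
        exact ⟨s, t.take (l1.length - s.length - w.length), by rw [List.append_assoc, ht]⟩
      · -- index l1.length falls inside w: contradiction with c ∉ w
        exfalso
        have hL : (s ++ (w ++ t))[l1.length]? = w[l1.length - s.length]? := by
          rw [List.getElem?_append_right (by omega), List.getElem?_append_left (by omega)]
        have hR : (l1 ++ c :: l2)[l1.length]? = some c := by
          rw [List.getElem?_append_right (le_refl _)]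
          simp
        have hw : w[l1.length - s.length]? = some c := by rw [← hL, h, hR]
        exact hc (List.mem_of_getElem? hw)
  · rintro (⟨s, t, h⟩ | ⟨s, t, h⟩)
    · exact ⟨s, t ++ c :: l2, by rw [← h]; simp⟩
    · exact ⟨l1 ++ c :: s, t, by rw [← h]; simp⟩

-- A nonempty, newline-free word is an infix of the newline-join iff it is an infix of some part.
theorem pvInfix_join (w : List Char) (hw : w ≠ []) (hn : '\n' ∉ w) :
    ∀ (parts : List (List Char)),
      (w <:+: PySem.Chars.join ['\n'] parts ↔ ∃ p ∈ parts, w <:+: p)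
  | [] => by simp [PySem.Chars.join_nil, List.infix_nil, hw]
  | [p] => by simp [PySem.Chars.join_singleton]
  | p :: q :: r => by
    rw [PySem.Chars.join_cons_cons]
    have : p ++ ['\n'] ++ PySem.Chars.join ['\n'] (q :: r)
        = p ++ '\n' :: PySem.Chars.join ['\n'] (q :: r) := by simp
    rw [this, pvInfix_append_cons w p _ '\n' hn, pvInfix_join w hw hn (q :: r)]
    simp

-- Per keyword: searching the joined text equals searching each column.
theorem pvIsIn_join (k : String) (hw : k.toList ≠ []) (hn : '\n' ∉ k.toList)
    (cols : List String) :
    PySem.Str.isIn k (PySem.Str.join "\n" cols)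
      = cols.any (fun c => PySem.Str.isIn k c) := by
  rw [Bool.eq_iff_iff]
  rw [PySem.Str.isIn_iff_infix]
  rw [PySem.Str.toList_join]
  have : (String.toList "\n") = ['\n'] := rfl
  rw [this, pvInfix_join k.toList hw hn (cols.map String.toList)]
  simp [List.any_eq_true, PySem.Chars.isIn_iff_infix]

-- ===== VERDICT (by name: the statement is the Claim_ definition above) =====
theorem detect_booking_export_spec : Claim_equal_detect_booking_export := by
  intro columns _
  unfold Spec_detect_booking_export detect_booking_export detect_booking_export_alt
  simp only [List.all_cons, List.all_nil,
    pvIsIn_join "nome osp" (by decide) (by decide),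
    pvIsIn_join "arrivo" (by decide) (by decide),
    pvIsIn_join "partenza" (by decide) (by decide),
    pvIsIn_join "prezzo" (by decide) (by decide),
    pvIsIn_join "persone" (by decide) (by decide)]
  simp [Bool.and_assoc]
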